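-- pv_equiv track=rewrite | github.com/sosrtv353/GOA-homeworks | level 92/homework/homework.py | mxdiflg
-- ===== SOURCE A (Python) =====
-- def mxdiflg(a1, a2):
--
--     if a1 == [] or a2 == []:
--         return -1
--
--     len1 = []
--     len2 = []
--
--     for i in a1:
--         len1.append(len(i))
--
--     for i in a2:
--         len2.append(len(i))
--
--     l = []
--     for i in len1:
--         for x in len2:
--             l.append(abs(i - x))
--
--     return max(l)
-- ===== SOURCE B (Python) =====
-- def mxdiflg(a1, a2):
--     if not a1 or not a2:
--         return -1
--     mx1 = max(map(len, a1))
--     mn1 = min(map(len, a1))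
--     mx2 = max(map(len, a2))
--     mn2 = min(map(len, a2))
--     return max(mx1 - mn2, mx2 - mn1)
-- ===== Notes on version B (the rewrite author's own statement) =====
-- stated objective: faster
-- what changed: Instead of materialising all n*m pairwise |len-len| differences and taking their max, B computes max/min string length of each list in one pass and returns max(mx1-mn2, mx2-mn1).
import Mathlib
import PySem

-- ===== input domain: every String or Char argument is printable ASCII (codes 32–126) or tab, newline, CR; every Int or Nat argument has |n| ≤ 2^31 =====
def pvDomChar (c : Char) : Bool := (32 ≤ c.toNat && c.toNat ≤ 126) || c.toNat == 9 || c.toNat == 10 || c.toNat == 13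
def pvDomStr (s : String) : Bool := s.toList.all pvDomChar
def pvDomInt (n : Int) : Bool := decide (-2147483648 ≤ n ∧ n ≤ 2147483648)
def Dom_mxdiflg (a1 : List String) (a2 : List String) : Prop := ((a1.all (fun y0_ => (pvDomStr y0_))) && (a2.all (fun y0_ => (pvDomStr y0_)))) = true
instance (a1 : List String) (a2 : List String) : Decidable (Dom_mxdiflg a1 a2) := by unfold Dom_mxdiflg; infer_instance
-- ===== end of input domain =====

-- B replaces A's n*m materialised pairwise |len-len| differences by per-list max/min string lengths.


-- ===== PORT A =====
def mxdiflg (a1 : List String) (a2 : List String) : Int :=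
  if a1 = [] ∨ a2 = [] then -1
  else
    let len1 : List Int := a1.foldl (fun acc i => acc ++ [PySem.Str.len i]) []
    let len2 : List Int := a2.foldl (fun acc i => acc ++ [PySem.Str.len i]) []
    let l : List Int := len1.foldl (fun acc i => len2.foldl (fun acc2 x => acc2 ++ [|i - x|]) acc) []
    (PySem.List.max? l (fun y => y)).getD 0   -- l ≠ [] here, so getD's default is never used

-- ===== PORT B =====
def mxdiflg_alt (a1 : List String) (a2 : List String) : Int :=
  if a1.isEmpty || a2.isEmpty then -1
  else
    let l1 : List Int := a1.map PySem.Str.len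
    let l2 : List Int := a2.map PySem.Str.len
    let mx1 := (PySem.List.max? l1 (fun y => y)).getD 0
    let mn1 := (PySem.List.min? l1 (fun y => y)).getD 0
    let mx2 := (PySem.List.max? l2 (fun y => y)).getD 0
    let mn2 := (PySem.List.min? l2 (fun y => y)).getD 0
    max (mx1 - mn2) (mx2 - mn1)

-- ===== PRECONDITION & SPEC =====
def Spec_mxdiflg (a1 : List String) (a2 : List String) (out : Int) : Prop := out = mxdiflg_alt a1 a2
instance (a1 : List String) (a2 : List String) (out : Int) : Decidable (Spec_mxdiflg a1 a2 out) := by unfold Spec_mxdiflg; infer_instance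

-- ===== CLAIM (what is proved, stated in full; the proofs are below) =====
def Claim_equal_mxdiflg : Prop := ∀ (a1 : List String) (a2 : List String), Dom_mxdiflg a1 a2 → Spec_mxdiflg a1 a2 (mxdiflg a1 a2)

-- ===== LEMMAS AND PROOFS =====

theorem pv_max_some {L : List Int} (h : L ≠ []) :
    ∃ m, PySem.List.max? L (fun y => y) = some m := by
  cases hm : PySem.List.max? L (fun y => y) with
  | none => exact absurd ((PySem.List.max?_eq_none_iff _ _).mp hm) h
  | some m => exact ⟨m, rfl⟩

theorem pv_min_some {L : List Int} (h : L ≠ []) :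
    ∃ m, PySem.List.min? L (fun y => y) = some m := by
  cases hm : PySem.List.min? L (fun y => y) with
  | none => exact absurd ((PySem.List.min?_eq_none_iff _ _).mp hm) h
  | some m => exact ⟨m, rfl⟩

theorem pv_key (L1 L2 : List Int) (h1 : L1 ≠ []) (h2 : L2 ≠ []) :
    (PySem.List.max? (L1.foldl (fun acc i => acc ++ L2.map (fun x => |i - x|)) []) (fun y => y)).getD 0
      = max ((PySem.List.max? L1 (fun y => y)).getD 0 - (PySem.List.min? L2 (fun y => y)).getD 0)
            ((PySem.List.max? L2 (fun y => y)).getD 0 - (PySem.List.min? L1 (fun y => y)).getD 0) := by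
  rw [show (fun (acc : List Int) (i : Int) => acc ++ L2.map (fun x => |i - x|))
        = fun acc i => acc ++ (fun i => L2.map (fun x => |i - x|)) i from rfl,
      PySem.List.foldl_append_eq_flatMap, List.nil_append]
  obtain ⟨m1, hm1⟩ := pv_max_some h1
  obtain ⟨n1, hn1⟩ := pv_min_some h1
  obtain ⟨m2, hm2⟩ := pv_max_some h2
  obtain ⟨n2, hn2⟩ := pv_min_some h2
  have hL : L1.flatMap (fun i => L2.map fun x => |i - x|) ≠ [] := by
    simp [List.flatMap_eq_nil_iff, List.map_eq_nil_iff]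
    exact ⟨List.exists_mem_of_ne_nil L1 h1, h2⟩
  obtain ⟨M, hM⟩ := pv_max_some hL
  rw [hM, hm1, hn1, hm2, hn2]
  simp only [Option.getD_some]
  have hMmem := PySem.List.max?_mem hM
  have hMub := PySem.List.max?_isMax hM
  have hm1mem := PySem.List.max?_mem hm1
  have hm1ub := PySem.List.max?_isMax hm1
  have hn1mem := PySem.List.min?_mem hn1
  have hn1lb := PySem.List.min?_isMin hn1
  have hm2mem := PySem.List.max?_mem hm2
  have hm2ub := PySem.List.max?_isMax hm2
  have hn2mem := PySem.List.min?_mem hn2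
  have hn2lb := PySem.List.min?_isMin hn2
  apply le_antisymm
  · obtain ⟨i, hi, y, hy, hMeq⟩ := by
      simpa [List.mem_flatMap, List.mem_map] using hMmem
    have h1' := hm1ub i hi
    have h2' := hn1lb i hi
    have h3' := hm2ub y hy
    have h4' := hn2lb y hy
    subst hMeq
    rcases le_total i y with hc | hc
    · calc |i - y| = y - i := by rw [abs_sub_comm]; exact abs_of_nonneg (by omega)
        _ ≤ m2 - n1 := by omega
        _ ≤ _ := le_max_right _ _
    · calc |i - y| = i - y := abs_of_nonneg (by omega)
        _ ≤ m1 - n2 := by omega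
        _ ≤ _ := le_max_left _ _
  · apply max_le
    · have : |m1 - n2| ∈ L1.flatMap (fun i => L2.map fun x => |i - x|) :=
        List.mem_flatMap.mpr ⟨m1, hm1mem, List.mem_map.mpr ⟨n2, hn2mem, rfl⟩⟩
      have := hMub _ this
      have := le_abs_self (m1 - n2)
      omega
    · have : |n1 - m2| ∈ L1.flatMap (fun i => L2.map fun x => |i - x|) :=
        List.mem_flatMap.mpr ⟨n1, hn1mem, List.mem_map.mpr ⟨m2, hm2mem, rfl⟩⟩
      have h := hMub _ this
      have : m2 - n1 ≤ |n1 - m2| := by rw [abs_sub_comm]; exact le_abs_self _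
      omega

theorem pv_main (a1 a2 : List String) : mxdiflg a1 a2 = mxdiflg_alt a1 a2 := by
  by_cases h1 : a1 = []
  · simp [mxdiflg, mxdiflg_alt, h1]
  · by_cases h2 : a2 = []
    · simp [mxdiflg, mxdiflg_alt, h2]
    · have hne : ¬ (a1 = [] ∨ a2 = []) := by tauto
      have hb : (a1.isEmpty || a2.isEmpty) = false := by
        simp [h1, h2]
      simp only [mxdiflg, mxdiflg_alt, if_neg hne, hb, Bool.false_eq_true, if_false,
        PySem.List.foldl_append_singleton_eq_map, List.nil_append]
      exact pv_key _ _ (by simpa using h1) (by simpa using h2)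

-- ===== VERDICT (by name: the statement is the Claim_ definition above) =====
theorem mxdiflg_spec : Claim_equal_mxdiflg := by
  intro a1 a2 _
  show mxdiflg a1 a2 = mxdiflg_alt a1 a2
  exact pv_main a1 a2
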